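-- pv_equiv track=rewrite | github.com/nlutala/data-structures-and-algorithms-gg | arrays/level2/subarray_with_zero_sum.py | is_subarray_with_0_sum
-- ===== SOURCE A (Python) =====
-- def is_subarray_with_0_sum(arr: list[int]) -> bool:
--     """
--     Given an array of positive and negative numbers, the task is to find if
--     there is a subarray (of size at least one) with 0 sum.\n
--
--     :param - arr (list of integers)\n
--
--     returns true or false if there is a subarray of (size at least one) with 0
--     sum.
--     """
--     length_of_sub_array = 1
--
--     while length_of_sub_array < len(arr) + 1:
--         for i in range(len(arr)):
--             if sum(arr[i:i + length_of_sub_array]) == 0: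
--                 return True
--
--         length_of_sub_array += 1
--
--     return False
-- ===== SOURCE B (Python) =====
-- def is_subarray_with_0_sum(arr: list[int]) -> bool:
--     """Prefix sums: a zero-sum contiguous subarray exists iff some prefix sum repeats
--     (the empty prefix sum 0 counts)."""
--     seen = {0}
--     s = 0
--     for x in arr:
--         s += x
--         if s in seen:
--             return True
--         seen.add(s)
--     return False
-- ===== Notes on version B (the rewrite author's own statement) =====
-- stated objective: faster
-- what changed: Replaces the nested scan over all subarray lengths and start positions with re-summed slices by a single pass that stores running prefix sums in a hash set: a repeated (or zero) prefix sum means a zero-sum subarray.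
import Mathlib
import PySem

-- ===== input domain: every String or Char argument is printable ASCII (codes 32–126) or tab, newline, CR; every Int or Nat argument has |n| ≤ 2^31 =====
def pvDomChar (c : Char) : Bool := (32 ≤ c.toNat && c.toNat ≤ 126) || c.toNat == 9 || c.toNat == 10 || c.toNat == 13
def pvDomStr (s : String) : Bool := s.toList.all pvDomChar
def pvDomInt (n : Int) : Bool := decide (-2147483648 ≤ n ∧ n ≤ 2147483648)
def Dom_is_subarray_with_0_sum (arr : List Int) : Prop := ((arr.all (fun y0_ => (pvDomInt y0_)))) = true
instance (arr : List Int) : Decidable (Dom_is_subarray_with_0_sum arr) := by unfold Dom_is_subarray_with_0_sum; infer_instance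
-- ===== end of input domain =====

-- B replaces A's nested subarray scan (all lengths × all starts, slices re-summed) by a single prefix-sum pass with a set: a different, asymptotically faster algorithm.


-- ===== PORT A =====
-- 'for i in range(len(arr)): if sum(arr[i:i+length_of_sub_array]) == 0: return True'
def pvAInner (arr : List Int) (L : Int) : Bool :=
  (PySem.List.pyRange 0 (arr.length : Int) 1).any
    (fun i => (PySem.List.slice arr (some i) (some (i + L))).sum == 0)

-- the 'while length_of_sub_array < len(arr) + 1' loop; fuel (= len(arr)+1) bounds the iterations, never exhausted
def pvALoop (arr : List Int) : Nat → Int → Bool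
  | 0, _ => false
  | fuel + 1, L =>
    if L < (arr.length : Int) + 1 then
      if pvAInner arr L then true
      else pvALoop arr fuel (L + 1)
    else false

def is_subarray_with_0_sum (arr : List Int) : Bool :=
  pvALoop arr (arr.length + 1) 1

-- ===== PORT B =====
-- single pass: running prefix sum s, set 'seen' of earlier prefix sums (starts as {0})
def pvBLoop (seen : PySem.Set Int) (s : Int) : List Int → Bool
  | [] => false
  | x :: rest =>
    if PySem.Set.contains seen (s + x) then true
    else pvBLoop (PySem.Set.add seen (s + x)) (s + x) rest

def is_subarray_with_0_sum_alt (arr : List Int) : Bool :=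
  pvBLoop (PySem.Set.ofList [0]) 0 arr

-- ===== PRECONDITION & SPEC =====
def Spec_is_subarray_with_0_sum (arr : List Int) (out : Bool) : Prop := out = is_subarray_with_0_sum_alt arr
instance (arr : List Int) (out : Bool) : Decidable (Spec_is_subarray_with_0_sum arr out) := by unfold Spec_is_subarray_with_0_sum; infer_instance

-- ===== CLAIM (what is proved, stated in full; the proofs are below) =====
def Claim_equal_is_subarray_with_0_sum : Prop := ∀ (arr : List Int), Dom_is_subarray_with_0_sum arr → Spec_is_subarray_with_0_sum arr (is_subarray_with_0_sum arr)

-- ===== LEMMAS AND PROOFS =====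

-- both programs decide this proposition: two prefix sums of arr coincide (⟺ a nonempty zero-sum segment exists)
def pvZero (arr : List Int) : Prop :=
  ∃ i j : Nat, i < j ∧ j ≤ arr.length ∧ (arr.take j).sum = (arr.take i).sum

-- a segment sum is the difference of two prefix sums
theorem pv_seg_sum (arr : List Int) (i j : Nat) (h : i ≤ j) :
    (arr.take j).sum = (arr.take i).sum + (((arr.drop i).take (j - i)).sum) := by
  have : arr.take j = arr.take i ++ (arr.drop i).take (j - i) := by
    rw [← List.take_add]; congr 1; omega
  rw [this, List.sum_append]

theorem pvAInner_iff (arr : List Int) (L : Int) :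
    pvAInner arr L = true ↔
      ∃ i : Nat, i < arr.length ∧ (PySem.List.slice arr (some (i : Int)) (some ((i : Int) + L))).sum = 0 := by
  unfold pvAInner
  rw [List.any_eq_true]
  constructor
  · rintro ⟨i, hi, hp⟩
    rw [PySem.List.mem_pyRange_one] at hi
    refine ⟨i.toNat, by omega, ?_⟩
    have : (i.toNat : Int) = i := by omega
    rw [this]
    simpa using hp
  · rintro ⟨i, hi, hp⟩
    refine ⟨(i : Int), ?_, by simpa using hp⟩
    rw [PySem.List.mem_pyRange_one]
    omega

theorem pvALoop_iff (arr : List Int) (fuel : Nat) (L : Int) :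
    pvALoop arr fuel L = true ↔
      ∃ k : Nat, k < fuel ∧ L + (k : Int) ≤ (arr.length : Int) ∧ pvAInner arr (L + (k : Int)) = true := by
  induction fuel generalizing L with
  | zero => simp [pvALoop]
  | succ fuel ih =>
    rw [pvALoop]
    split_ifs with h1 h2
    · simp only [true_iff]
      exact ⟨0, by omega, by simpa using h1, by simpa using h2⟩
    · rw [ih]
      constructor
      · rintro ⟨k, hk, hle, hin⟩
        exact ⟨k + 1, by omega, by push_cast; omega, by
          have : L + ((k : Int) + 1) = L + 1 + (k : Int) := by ring
          rw [show ((k + 1 : Nat) : Int) = (k : Int) + 1 by push_cast; ring, this]; exact hin⟩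
      · rintro ⟨k, hk, hle, hin⟩
        match k with
        | 0 => simp at hin; exact absurd hin (by simpa using h2)
        | k' + 1 =>
          refine ⟨k', by omega, by push_cast at hle ⊢; omega, ?_⟩
          have : L + 1 + (k' : Int) = L + ((k' + 1 : Nat) : Int) := by push_cast; ring
          rw [this]; exact hin
    · simp only [false_iff]
      rintro ⟨k, hk, hle, hin⟩
      omega

theorem pv_slice_eq (arr : List Int) (i : Nat) (L : Int) (hL : 1 ≤ L) :
    PySem.List.slice arr (some (i : Int)) (some ((i : Int) + L)) = (arr.drop i).take L.toNat := by
  rw [PySem.List.slice_toNat arr (by omega) (by omega)]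
  congr 1
  omega

theorem pvA_exists_iff_zero (arr : List Int)
    (h : ∃ L : Int, 1 ≤ L ∧ L ≤ (arr.length : Int) ∧
      ∃ i : Nat, i < arr.length ∧ ((arr.drop i).take L.toNat).sum = 0) :
    pvZero arr := by
  obtain ⟨L, hL1, hLn, i, hi, hs⟩ := h
  set t := L.toNat with ht
  have ht1 : 1 ≤ t := by omega
  by_cases hc : i + t ≤ arr.length
  · refine ⟨i, i + t, by omega, hc, ?_⟩
    rw [pv_seg_sum arr i (i + t) (by omega)]
    simpa using hs
  · refine ⟨i, arr.length, by omega, le_refl _, ?_⟩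
    rw [pv_seg_sum arr i arr.length (by omega)]
    have h1 : (arr.drop i).take t = arr.drop i :=
      List.take_of_length_le (by simp; omega)
    have h2 : (arr.drop i).take (arr.length - i) = arr.drop i :=
      List.take_of_length_le (by simp)
    rw [h2, ← h1, hs, add_zero]

theorem pvZero_exists (arr : List Int) (hz : pvZero arr) :
    ∃ L : Int, 1 ≤ L ∧ L ≤ (arr.length : Int) ∧
      ∃ i : Nat, i < arr.length ∧ ((arr.drop i).take L.toNat).sum = 0 := by
  obtain ⟨i, j, hij, hj, hs⟩ := hz
  refine ⟨((j - i : Nat) : Int), by omega, by omega, i, by omega, ?_⟩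
  have : (((j - i : Nat) : Int)).toNat = j - i := by omega
  rw [this]
  have := pv_seg_sum arr i j (by omega)
  omega

theorem pvBLoop_iff (l : List Int) (seen : PySem.Set Int) (s : Int) :
    pvBLoop seen s l = true ↔
      ∃ k : Nat, k < l.length ∧
        ((s + (l.take (k + 1)).sum) ∈ seen ∨
          ∃ j : Nat, j < k ∧ s + (l.take (k + 1)).sum = s + (l.take (j + 1)).sum) := by
  induction l generalizing seen s with
  | nil => simp [pvBLoop]
  | cons x rest ih =>
    rw [pvBLoop]
    split_ifs with h
    · rw [PySem.Set.contains_iff] at h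
      simp only [true_iff]
      exact ⟨0, by simp, Or.inl (by simpa using h)⟩
    · rw [ih]
      have hnm : (s + x) ∉ seen := by
        rw [← PySem.Set.contains_iff]; simpa using h
      constructor
      · rintro ⟨k, hk, hmem | ⟨j, hj, heq⟩⟩
        · rw [PySem.Set.mem_add] at hmem
          rcases hmem with hmem | hmem
          · refine ⟨k + 1, by simp; omega, Or.inl ?_⟩
            simpa [add_assoc] using hmem
          · refine ⟨k + 1, by simp; omega, Or.inr ⟨0, by omega, ?_⟩⟩
            simp only [List.take_succ_cons, List.sum_cons, List.take_zero, List.sum_nil]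
            omega
        · refine ⟨k + 1, by simp; omega, Or.inr ⟨j + 1, by omega, ?_⟩⟩
          simp only [List.take_succ_cons, List.sum_cons]
          omega
      · rintro ⟨k, hk, hmem | ⟨j, hj, heq⟩⟩
        · match k with
          | 0 =>
            exfalso; apply hnm
            simpa using hmem
          | k' + 1 =>
            refine ⟨k', by simp at hk; omega, Or.inl ?_⟩
            rw [PySem.Set.mem_add]
            left
            simpa [add_assoc] using hmem
        · match k, j with
          | k' + 1, 0 =>
            refine ⟨k', by simp at hk; omega, Or.inl ?_⟩
            rw [PySem.Set.mem_add]
            right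
            simp only [List.take_succ_cons, List.sum_cons, List.take_zero, List.sum_nil] at heq
            omega
          | k' + 1, j' + 1 =>
            refine ⟨k', by simp at hk; omega, Or.inr ⟨j', by omega, ?_⟩⟩
            simp only [List.take_succ_cons, List.sum_cons] at heq
            omega

theorem pvA_iff (arr : List Int) : is_subarray_with_0_sum arr = true ↔ pvZero arr := by
  unfold is_subarray_with_0_sum
  rw [pvALoop_iff]
  constructor
  · rintro ⟨k, hk, hle, hin⟩
    rw [pvAInner_iff] at hin
    obtain ⟨i, hi, hs⟩ := hin
    apply pvA_exists_iff_zero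
    refine ⟨1 + (k : Int), by omega, hle, i, hi, ?_⟩
    rw [← pv_slice_eq arr i (1 + (k : Int)) (by omega)]
    exact hs
  · intro hz
    obtain ⟨L, hL1, hLn, i, hi, hs⟩ := pvZero_exists arr hz
    refine ⟨(L - 1).toNat, by omega, by omega, ?_⟩
    have hL' : 1 + ((L - 1).toNat : Int) = L := by omega
    rw [hL', pvAInner_iff]
    exact ⟨i, hi, by rw [pv_slice_eq arr i L hL1]; exact hs⟩

theorem pvB_iff (arr : List Int) : is_subarray_with_0_sum_alt arr = true ↔ pvZero arr := by
  unfold is_subarray_with_0_sum_alt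
  rw [pvBLoop_iff]
  constructor
  · rintro ⟨k, hk, hmem | ⟨j, hj, heq⟩⟩
    · rw [PySem.Set.mem_ofList] at hmem
      simp only [List.mem_singleton] at hmem
      exact ⟨0, k + 1, by omega, by omega, by simpa using hmem⟩
    · exact ⟨j + 1, k + 1, by omega, by omega, by omega⟩
  · rintro ⟨i, j, hij, hj, hs⟩
    refine ⟨j - 1, by omega, ?_⟩
    have hj1 : j - 1 + 1 = j := by omega
    rw [hj1]
    match i with
    | 0 =>
      left
      rw [PySem.Set.mem_ofList]
      simp only [List.mem_singleton]
      simpa using hs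
    | i' + 1 =>
      right
      exact ⟨i', by omega, by omega⟩

-- ===== VERDICT (by name: the statement is the Claim_ definition above) =====
theorem is_subarray_with_0_sum_spec : Claim_equal_is_subarray_with_0_sum := by
  intro arr _
  unfold Spec_is_subarray_with_0_sum
  have hA := pvA_iff arr
  have hB := pvB_iff arr
  cases hA' : is_subarray_with_0_sum arr <;> cases hB' : is_subarray_with_0_sum_alt arr <;>
    simp_all
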